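-- pv_equiv track=rewrite | github.com/renkilaharsha/Backtracking-4 | Problem-1.py | findDistance
-- ===== SOURCE A (Python) =====
-- def findDistance(grid):
--     queue = []
--     visited  = [[False for _ in range(len(grid[0]))] for _ in range(len(grid))]
--     for i in range(len(grid)):
--         for j in range(len(grid[0])):
--             if grid[i][j]==0:
--                 queue.append((i,j))
--                 visited[i][j]=True
--
--     directions = [[-1,0],[1,0],[0,-1],[0,1]]
--     distance = 0
--     while queue:
--         size = len(queue)
--         for _ in range(size):
--             (x,y) = queue.pop(0)
--             for r,c in directions:
--                 nr = r+x
--                 nc = c+y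
--
--                 if 0<=nr<len(grid) and 0<=nc<len(grid[0]) and visited[nr][nc]==False:
--                     visited[nr][nc] = True
--                     queue.append((nr,nc))
--         distance+=1
--     return distance-1
-- ===== SOURCE B (Python) =====
-- def findDistance(grid):
--     if not grid:
--         return -1
--     cols = len(grid[0])
--     zeros = [(i, j) for i in range(len(grid)) for j in range(cols) if grid[i][j] == 0]
--     if not zeros:
--         return -1
--     best = 0
--     for i in range(len(grid)):
--         for j in range(cols):
--             d = len(grid) + cols
--             for (zi, zj) in zeros:
--                 d = min(d, abs(i - zi) + abs(j - zj))
--             if d > best: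
--                 best = d
--     return best
-- ===== Notes on version B (the rewrite author's own statement) =====
-- stated objective: alternative
-- what changed: Replaced the multi-source BFS with queue/visited state by a direct closed-form computation: collect the zero cells once, then for every cell take the minimum Manhattan distance to a zero and return the maximum (distances coincide with BFS because the grid has no obstacles).
import Mathlib
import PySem

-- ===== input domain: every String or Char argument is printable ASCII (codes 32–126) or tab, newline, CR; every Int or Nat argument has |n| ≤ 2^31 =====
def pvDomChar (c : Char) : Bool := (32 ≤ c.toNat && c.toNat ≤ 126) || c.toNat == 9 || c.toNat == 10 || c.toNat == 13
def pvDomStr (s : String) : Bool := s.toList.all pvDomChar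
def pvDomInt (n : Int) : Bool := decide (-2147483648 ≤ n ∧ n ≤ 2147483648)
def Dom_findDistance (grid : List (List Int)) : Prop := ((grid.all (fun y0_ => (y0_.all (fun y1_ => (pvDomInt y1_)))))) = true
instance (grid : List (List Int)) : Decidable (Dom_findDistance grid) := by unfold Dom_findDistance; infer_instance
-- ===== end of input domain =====

-- B replaces A's multi-source BFS by a direct max-of-min-Manhattan-distance computation (same values; not faster).

-- ===== PORT A =====
-- grid[i][j]; indices at every use site are guarded 0 ≤ · < length, where pyGetD is exact
def pvGridAt (grid : List (List Int)) (i j : Int) : Int :=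
  PySem.List.pyGetD (PySem.List.pyGetD grid i []) j 0

-- visited[i][j] read/write; used only under the 0 ≤ nr < len guards, where .toNat is exact
def pvVGet (v : List (List Bool)) (i j : Int) : Bool :=
  (v.getD i.toNat []).getD j.toNat false

def pvVSet (v : List (List Bool)) (i j : Int) : List (List Bool) :=
  v.set i.toNat ((v.getD i.toNat []).set j.toNat true)

def pvDirs : List (Int × Int) := [(-1, 0), (1, 0), (0, -1), (0, 1)]

-- one direction step of the BFS inner loop (x,y = popped cell, rc = direction)
def pvStepA (grid : List (List Int)) (x y : Int)
    (st : List (List Bool) × List (Int × Int)) (rc : Int × Int) :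
    List (List Bool) × List (Int × Int) :=
  let nr := rc.1 + x
  let nc := rc.2 + y
  if 0 ≤ nr ∧ nr < (grid.length : Int) ∧ 0 ≤ nc ∧ nc < ((grid.headD []).length : Int)
      ∧ pvVGet st.1 nr nc = false then
    (pvVSet st.1 nr nc, st.2 ++ [(nr, nc)])
  else st

-- "for _ in range(size): (x,y) = queue.pop(0); for r,c in directions: …"
def pvRound (grid : List (List Int)) :
    Nat → List (List Bool) × List (Int × Int) → List (List Bool) × List (Int × Int)
  | 0, st => st
  | k + 1, (v, q) =>
    match q with
    | [] => (v, [])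
    | c :: rest => pvRound grid k (pvDirs.foldl (pvStepA grid c.1 c.2) (v, rest))

-- "while queue: …; distance += 1"; the fuel only makes the loop total: rows*cols+1
-- iterations always suffice (each BFS level is a nonempty fresh set of cells), proved below
def pvLoopA (grid : List (List Int)) :
    Nat → List (List Bool) → List (Int × Int) → Int → Int
  | _, _, [], dist => dist - 1
  | 0, _, _, dist => dist - 1
  | f + 1, v, q, dist =>
    let st := pvRound grid q.length (v, q)
    pvLoopA grid f st.1 st.2 (dist + 1)

def findDistance (grid : List (List Int)) : Int :=
  let rows := grid.length
  let cols := (grid.headD []).length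
  let visited0 : List (List Bool) :=
    (List.range rows).map (fun _ => (List.range cols).map (fun _ => false))
  let init :=
    (PySem.List.pyRange 0 (rows : Int) 1).foldl (fun st i =>
      (PySem.List.pyRange 0 (cols : Int) 1).foldl (fun st j =>
        if pvGridAt grid i j = 0 then (pvVSet st.1 i j, st.2 ++ [(i, j)]) else st) st)
      (visited0, ([] : List (Int × Int)))
  pvLoopA grid (rows * cols + 1) init.1 init.2 0

-- ===== PORT B =====
def findDistance_alt (grid : List (List Int)) : Int :=
  if grid = [] then -1
  else
  let rows : Int := (grid.length : Int)
  let cols : Int := ((grid.headD []).length : Int)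
  let zeros : List (Int × Int) :=
    (PySem.List.pyRange 0 rows 1).flatMap (fun i =>
      (PySem.List.pyRange 0 cols 1).filterMap (fun j =>
        if pvGridAt grid i j = 0 then some (i, j) else none))
  if zeros = [] then -1
  else
    (PySem.List.pyRange 0 rows 1).foldl (fun best i =>
      (PySem.List.pyRange 0 cols 1).foldl (fun best j =>
        let d := zeros.foldl (fun d z => min d (|i - z.1| + |j - z.2|)) (rows + cols)
        if d > best then d else best) best) 0

-- ===== PRECONDITION & SPEC =====
-- Pre_ excludes exactly the inputs where the Python A raises IndexError: ragged grids
-- having a row shorter than the first row (grid[i][j] in the zero scan).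
def Pre_findDistance (grid : List (List Int)) : Prop :=
  ∀ row ∈ grid, (grid.headD []).length ≤ row.length
instance (grid : List (List Int)) : Decidable (Pre_findDistance grid) := by
  unfold Pre_findDistance; infer_instance

def pvWitness_findDistance : List (List Int) := [[0, 1], [1, 1]]

def Spec_findDistance (grid : List (List Int)) (out : Int) : Prop := out = findDistance_alt grid
instance (grid : List (List Int)) (out : Int) : Decidable (Spec_findDistance grid out) := by
  unfold Spec_findDistance; infer_instance

-- ===== CLAIM (what is proved, stated in full; the proofs are below) =====
def Claim_equal_findDistance : Prop :=
  ∀ (grid : List (List Int)), Dom_findDistance grid → Pre_findDistance grid →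
    Spec_findDistance grid (findDistance grid)

-- ===== LEMMAS AND PROOFS =====

-- abbreviations for the proof layer
def pvR (grid : List (List Int)) : Int := (grid.length : Int)
def pvC (grid : List (List Int)) : Int := ((grid.headD []).length : Int)
def pvRect (grid : List (List Int)) (p : Int × Int) : Prop :=
  0 ≤ p.1 ∧ p.1 < pvR grid ∧ 0 ≤ p.2 ∧ p.2 < pvC grid
def pvZeros (grid : List (List Int)) : List (Int × Int) :=
  (PySem.List.pyRange 0 (pvR grid) 1).flatMap (fun i =>
    (PySem.List.pyRange 0 (pvC grid) 1).filterMap (fun j =>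
      if pvGridAt grid i j = 0 then some (i, j) else none))
def pvManh (p q : Int × Int) : Int := ((p.1 - q.1).natAbs : Int) + ((p.2 - q.2).natAbs : Int)
def pvD (grid : List (List Int)) (p : Int × Int) : Int :=
  (pvZeros grid).foldl (fun d z => min d (pvManh p z)) (pvR grid + pvC grid)
def pvCells (grid : List (List Int)) : List (Int × Int) :=
  (PySem.List.pyRange 0 (pvR grid) 1).flatMap (fun i =>
    (PySem.List.pyRange 0 (pvC grid) 1).map (fun j => (i, j)))
def pvDmax (grid : List (List Int)) : Int :=
  (pvCells grid).foldl (fun b p => max b (pvD grid p)) 0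
def pvShape (grid : List (List Int)) (v : List (List Bool)) : Prop :=
  v.length = grid.length ∧ ∀ row ∈ v, row.length = (grid.headD []).length
def pvExpand (grid : List (List Int)) (st : List (List Bool) × List (Int × Int))
    (c : Int × Int) : List (List Bool) × List (Int × Int) :=
  pvDirs.foldl (pvStepA grid c.1 c.2) st

-- generic foldl min/max facts
theorem pv_foldl_min_le_init {α : Type} (l : List α) (f : α → Int) (a : Int) :
    l.foldl (fun d z => min d (f z)) a ≤ a := by
  induction l generalizing a with
  | nil => simp
  | cons x xs ih => exact le_trans (ih _) (min_le_left _ _)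

theorem pv_foldl_min_le_mem {α : Type} {l : List α} (f : α → Int) (a : Int) {x : α} (hx : x ∈ l) :
    l.foldl (fun d z => min d (f z)) a ≤ f x := by
  induction l generalizing a with
  | nil => simp at hx
  | cons y ys ih =>
    simp only [List.foldl_cons]
    rcases List.mem_cons.1 hx with h | h
    · subst h; exact le_trans (pv_foldl_min_le_init ys f _) (min_le_right _ _)
    · first | exact ih h _ | exact ih _ h

theorem pv_foldl_min_attain {α : Type} (l : List α) (f : α → Int) (a : Int) :
    l.foldl (fun d z => min d (f z)) a = a ∨ ∃ x ∈ l, l.foldl (fun d z => min d (f z)) a = f x := by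
  induction l generalizing a with
  | nil => left; rfl
  | cons y ys ih =>
    rcases ih (min a (f y)) with h | ⟨x, hx, hfx⟩
    · rcases min_cases a (f y) with ⟨he, _⟩ | ⟨he, _⟩
      · left; simpa [List.foldl, he] using h
      · right; exact ⟨y, by simp, by simpa [List.foldl, he] using h⟩
    · right; exact ⟨x, by simp [hx], by simpa [List.foldl] using hfx⟩

theorem pv_foldl_min_nonneg {α : Type} (l : List α) (f : α → Int) (a : Int)
    (ha : 0 ≤ a) (hf : ∀ x ∈ l, 0 ≤ f x) : 0 ≤ l.foldl (fun d z => min d (f z)) a := by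
  rcases pv_foldl_min_attain l f a with h | ⟨x, hx, h⟩
  · omega
  · rw [h]; exact hf x hx

theorem pv_le_foldl_max {α : Type} (l : List α) (f : α → Int) (a : Int) :
    a ≤ l.foldl (fun d z => max d (f z)) a := by
  induction l generalizing a with
  | nil => simp
  | cons x xs ih => exact le_trans (le_max_left _ _) (ih _)

theorem pv_foldl_max_le_mem {α : Type} {l : List α} (f : α → Int) (a : Int) {x : α} (hx : x ∈ l) :
    f x ≤ l.foldl (fun d z => max d (f z)) a := by
  induction l generalizing a with
  | nil => simp at hx
  | cons y ys ih =>
    simp only [List.foldl_cons]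
    rcases List.mem_cons.1 hx with h | h
    · subst h; exact le_trans (le_max_right _ _) (pv_le_foldl_max ys f _)
    · first | exact ih h _ | exact ih _ h

theorem pv_foldl_max_attain {α : Type} (l : List α) (f : α → Int) (a : Int) :
    l.foldl (fun d z => max d (f z)) a = a ∨ ∃ x ∈ l, l.foldl (fun d z => max d (f z)) a = f x := by
  induction l generalizing a with
  | nil => left; rfl
  | cons y ys ih =>
    rcases ih (max a (f y)) with h | ⟨x, hx, hfx⟩
    · rcases max_cases a (f y) with ⟨he, _⟩ | ⟨he, _⟩
      · left; simpa [List.foldl, he] using h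
      · right; exact ⟨y, by simp, by simpa [List.foldl, he] using h⟩
    · right; exact ⟨x, by simp [hx], by simpa [List.foldl] using hfx⟩

theorem pv_foldl_max_le {α : Type} (l : List α) (f : α → Int) (a b : Int)
    (ha : a ≤ b) (hf : ∀ x ∈ l, f x ≤ b) : l.foldl (fun d z => max d (f z)) a ≤ b := by
  rcases pv_foldl_max_attain l f a with h | ⟨x, hx, h⟩
  · omega
  · rw [h]; exact hf x hx

theorem pv_foldl_flatMap {α β γ : Type} (xs : List α) (g : α → List β) (h : γ → β → γ) (init : γ) :
    (xs.flatMap g).foldl h init = xs.foldl (fun acc x => (g x).foldl h acc) init := by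
  induction xs generalizing init with
  | nil => rfl
  | cons x xs ih => simp [List.foldl_append, ih]

-- membership
theorem pv_mem_zeros (grid : List (List Int)) (p : Int × Int) :
    p ∈ pvZeros grid ↔ pvRect grid p ∧ pvGridAt grid p.1 p.2 = 0 := by
  unfold pvZeros pvRect
  simp only [List.mem_flatMap, List.mem_filterMap, PySem.List.mem_pyRange_one]
  constructor
  · rintro ⟨i, hi, j, hj, hij⟩
    split_ifs at hij with h
    · cases hij; exact ⟨⟨hi.1, hi.2, hj.1, hj.2⟩, h⟩
  · rintro ⟨⟨h1, h2, h3, h4⟩, hz⟩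
    exact ⟨p.1, ⟨h1, h2⟩, p.2, ⟨h3, h4⟩, by simp [hz]⟩

theorem pv_mem_cells (grid : List (List Int)) (p : Int × Int) :
    p ∈ pvCells grid ↔ pvRect grid p := by
  unfold pvCells pvRect
  simp only [List.mem_flatMap, List.mem_map, PySem.List.mem_pyRange_one]
  constructor
  · rintro ⟨i, hi, j, hj, rfl⟩; exact ⟨hi.1, hi.2, hj.1, hj.2⟩
  · rintro ⟨h1, h2, h3, h4⟩; exact ⟨p.1, ⟨h1, h2⟩, p.2, ⟨h3, h4⟩, rfl⟩

-- dmin facts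
theorem pv_dmin_le_manh (grid : List (List Int)) (p : Int × Int) {z : Int × Int}
    (hz : z ∈ pvZeros grid) : pvD grid p ≤ pvManh p z :=
  pv_foldl_min_le_mem _ _ hz

theorem pv_dmin_nonneg (grid : List (List Int)) (p : Int × Int) : 0 ≤ pvD grid p := by
  apply pv_foldl_min_nonneg
  · unfold pvR pvC; positivity
  · intro x _; unfold pvManh; positivity

theorem pv_rect_of_mem_zeros (grid : List (List Int)) {z : Int × Int} (hz : z ∈ pvZeros grid) :
    pvRect grid z := ((pv_mem_zeros grid z).1 hz).1

theorem pv_dmin_attain (grid : List (List Int)) {p : Int × Int}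
    (hne : pvZeros grid ≠ []) (hp : pvRect grid p) :
    ∃ z ∈ pvZeros grid, pvD grid p = pvManh p z := by
  obtain ⟨z0, hz0⟩ := List.exists_mem_of_ne_nil _ hne
  have hz0r := pv_rect_of_mem_zeros grid hz0
  have hlt : pvManh p z0 < pvR grid + pvC grid := by
    obtain ⟨a1, a2, a3, a4⟩ := hp; obtain ⟨b1, b2, b3, b4⟩ := hz0r
    unfold pvManh; omega
  rcases pv_foldl_min_attain (pvZeros grid) (pvManh p) (pvR grid + pvC grid) with h | h
  · exfalso
    have := pv_dmin_le_manh grid p hz0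
    unfold pvD at this; omega
  · exact h

theorem pv_dmin_zero_iff (grid : List (List Int)) {p : Int × Int}
    (hne : pvZeros grid ≠ []) (hp : pvRect grid p) :
    pvD grid p = 0 ↔ p ∈ pvZeros grid := by
  constructor
  · intro h
    obtain ⟨z, hz, he⟩ := pv_dmin_attain grid hne hp
    have : p = z := by
      obtain ⟨x, y⟩ := p; obtain ⟨zx, zy⟩ := z
      unfold pvManh at he; simp only at he
      have : x = zx ∧ y = zy := by omega
      simp [this.1, this.2]
    rwa [this]
  · intro h
    have h1 := pv_dmin_le_manh grid p h
    have h2 := pv_dmin_nonneg grid p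
    have : pvManh p p = 0 := by unfold pvManh; simp
    omega

theorem pv_dmin_lip (grid : List (List Int)) {p q : Int × Int}
    (hne : pvZeros grid ≠ []) (hq : pvRect grid q) (h : pvManh p q = 1) :
    pvD grid p ≤ pvD grid q + 1 := by
  obtain ⟨z, hz, he⟩ := pv_dmin_attain grid hne hq
  have h1 := pv_dmin_le_manh grid p hz
  have htri : pvManh p z ≤ pvManh q z + 1 := by
    unfold pvManh at h ⊢; omega
  omega

theorem pv_dmin_descend (grid : List (List Int)) {p : Int × Int}
    (hne : pvZeros grid ≠ []) (hp : pvRect grid p) (hpos : 0 < pvD grid p) :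
    ∃ p', pvRect grid p' ∧ pvManh p p' = 1 ∧ pvD grid p' = pvD grid p - 1 := by
  obtain ⟨z, hz, he⟩ := pv_dmin_attain grid hne hp
  have hzr := pv_rect_of_mem_zeros grid hz
  obtain ⟨x, y⟩ := p; obtain ⟨zx, zy⟩ := z
  obtain ⟨a1, a2, a3, a4⟩ := hp; obtain ⟨b1, b2, b3, b4⟩ := hzr
  simp only at a1 a2 a3 a4 b1 b2 b3 b4
  set p' : Int × Int :=
    if x < zx then (x + 1, y) else if zx < x then (x - 1, y)
    else if y < zy then (x, y + 1) else (x, y - 1) with hp'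
  have hne0 : pvManh (x, y) (zx, zy) ≠ 0 := by omega
  have key : pvRect grid p' ∧ pvManh (x, y) p' = 1 ∧
      pvManh p' (zx, zy) = pvManh (x, y) (zx, zy) - 1 := by
    rw [hp']; unfold pvRect pvManh at hne0 ⊢
    simp only at hne0
    split_ifs with c1 c2 c3 <;> simp only <;>
      refine ⟨⟨?_, ?_, ?_, ?_⟩, ?_, ?_⟩ <;> omega
  refine ⟨p', key.1, key.2.1, ?_⟩
  have hle : pvD grid p' ≤ pvD grid (x, y) - 1 := by
    have := pv_dmin_le_manh grid p' hz
    omega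
  have hge := pv_dmin_lip grid hne key.1 key.2.1
  omega

theorem pv_dmin_exists_between (grid : List (List Int)) (hne : pvZeros grid ≠ []) :
    ∀ n : Nat, ∀ p, pvRect grid p → pvD grid p = (n : Int) →
      ∀ d : Int, 0 ≤ d → d ≤ (n : Int) → ∃ p', pvRect grid p' ∧ pvD grid p' = d := by
  intro n
  induction n with
  | zero => intro p hp hD d hd0 hdn; exact ⟨p, hp, by omega⟩
  | succ m ih =>
    intro p hp hD d hd0 hdn
    by_cases hd : d = ((m + 1 : Nat) : Int)
    · exact ⟨p, hp, by rw [hD, hd]⟩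
    · obtain ⟨p', hp', _, hD'⟩ := pv_dmin_descend grid hne hp (by push_cast at hD; omega)
      exact ih p' hp' (by push_cast at hD hd ⊢; omega) d hd0 (by push_cast at hdn hd ⊢; omega)

theorem pv_dmin_le_Dmax (grid : List (List Int)) {p : Int × Int} (hp : pvRect grid p) :
    pvD grid p ≤ pvDmax grid :=
  pv_foldl_max_le_mem _ _ ((pv_mem_cells grid p).2 hp)

theorem pv_Dmax_nonneg (grid : List (List Int)) : 0 ≤ pvDmax grid :=
  pv_le_foldl_max _ _ _

theorem pv_frontier_nonempty (grid : List (List Int)) (hne : pvZeros grid ≠ []) :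
    ∀ d : Int, 0 ≤ d → d ≤ pvDmax grid → ∃ p, pvRect grid p ∧ pvD grid p = d := by
  intro d hd0 hdm
  rcases pv_foldl_max_attain (pvCells grid) (pvD grid) 0 with h | ⟨x, hx, h⟩
  · obtain ⟨z0, hz0⟩ := List.exists_mem_of_ne_nil _ hne
    have hz0r := pv_rect_of_mem_zeros grid hz0
    have : pvD grid z0 = 0 := (pv_dmin_zero_iff grid hne hz0r).2 hz0
    unfold pvDmax at hdm; rw [h] at hdm
    exact ⟨z0, hz0r, by omega⟩
  · have hxr := (pv_mem_cells grid x).1 hx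
    have hDx : pvD grid x = pvDmax grid := by unfold pvDmax; rw [h]
    have hnn := pv_dmin_nonneg grid x
    obtain ⟨n, hn⟩ : ∃ n : Nat, pvD grid x = (n : Int) := ⟨(pvD grid x).toNat, by omega⟩
    exact pv_dmin_exists_between grid hne n x hxr hn d hd0 (by omega)

-- visited-matrix lemmas
theorem pv_getD_set {α : Type} (l : List α) (n m : Nat) (a d : α) :
    (l.set n a).getD m d = if m = n ∧ n < l.length then a else l.getD m d := by
  simp [List.getD_eq_getElem?_getD, List.getElem?_set]
  split_ifs <;> simp_all

theorem pv_shape_set (grid : List (List Int)) (v : List (List Bool)) (i j : Int)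
    (hs : pvShape grid v) : pvShape grid (pvVSet v i j) := by
  obtain ⟨h1, h2⟩ := hs
  refine ⟨by simp [pvVSet, h1], ?_⟩
  intro row hrow
  by_cases hi : i.toNat < v.length
  · rcases List.mem_or_eq_of_mem_set hrow with h | h
    · exact h2 row h
    · have hmem : v.getD i.toNat [] ∈ v := by
        rw [List.getD_eq_getElem?_getD, List.getElem?_eq_getElem hi]
        exact List.getElem_mem hi
      rw [h, List.length_set]
      exact h2 _ hmem
  · rw [pvVSet, List.set_eq_of_length_le (by omega)] at hrow
    exact h2 row hrow

theorem pv_vget_set (grid : List (List Int)) (v : List (List Bool))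
    (hs : pvShape grid v) {p q : Int × Int} (hp : pvRect grid p) (hq : pvRect grid q) :
    pvVGet (pvVSet v p.1 p.2) q.1 q.2 = if q = p then true else pvVGet v q.1 q.2 := by
  obtain ⟨hp1, hp2, hp3, hp4⟩ := hp
  obtain ⟨hq1, hq2, hq3, hq4⟩ := hq
  have hRl : pvR grid = (v.length : Int) := by rw [pvR, hs.1]
  have hlt1 : p.1.toNat < v.length := by omega
  have hrowmem : v.getD p.1.toNat [] ∈ v := by
    rw [List.getD_eq_getElem?_getD, List.getElem?_eq_getElem hlt1]
    exact List.getElem_mem hlt1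
  have hrowlen : (v.getD p.1.toNat []).length = (grid.headD []).length := hs.2 _ hrowmem
  have hlt2 : p.2.toNat < (v.getD p.1.toNat []).length := by
    rw [hrowlen]; rw [pvC] at hp4; omega
  unfold pvVGet pvVSet
  rw [pv_getD_set]
  by_cases h1 : q.1.toNat = p.1.toNat
  · have e1 : q.1 = p.1 := by omega
    rw [if_pos ⟨h1, hlt1⟩, pv_getD_set]
    by_cases h2 : q.2.toNat = p.2.toNat
    · have e2 : q.2 = p.2 := by omega
      rw [if_pos ⟨h2, hlt2⟩, if_pos (Prod.ext e1 e2)]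
    · rw [if_neg (fun hh => h2 hh.1),
        if_neg (show q ≠ p from fun h => h2 (by rw [h]))]
      show (v.getD p.1.toNat []).getD q.2.toNat false = pvVGet v q.1 q.2
      rw [pvVGet, h1]
  · rw [if_neg (fun hh => h1 hh.1),
      if_neg (show q ≠ p from fun h => h1 (by rw [h]))]

-- queue-independence of the direction step, and the round as a fold
theorem pv_step_snd (grid : List (List Int)) (x y : Int) (v : List (List Bool))
    (q : List (Int × Int)) (rc : Int × Int) :
    pvStepA grid x y (v, q) rc =
      ((pvStepA grid x y (v, []) rc).1, q ++ (pvStepA grid x y (v, []) rc).2) := by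
  simp only [pvStepA]
  split_ifs <;> simp

theorem pv_fold_step_indep (grid : List (List Int)) (x y : Int) :
    ∀ (ds : List (Int × Int)) (v : List (List Bool)) (q : List (Int × Int)),
      ds.foldl (pvStepA grid x y) (v, q) =
        ((ds.foldl (pvStepA grid x y) (v, [])).1,
          q ++ (ds.foldl (pvStepA grid x y) (v, [])).2) := by
  intro ds
  induction ds with
  | nil => intro v q; simp
  | cons d ds ih =>
    intro v q
    simp only [List.foldl_cons]
    rw [pv_step_snd grid x y v q d]
    rw [ih (pvStepA grid x y (v, []) d).1 (q ++ (pvStepA grid x y (v, []) d).2)]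
    conv_rhs => rw [← Prod.mk.eta (p := pvStepA grid x y (v, []) d)]
    rw [ih (pvStepA grid x y (v, []) d).1 (pvStepA grid x y (v, []) d).2]
    simp [List.append_assoc]

theorem pv_round_eq (grid : List (List Int)) :
    ∀ (q tail : List (Int × Int)) (v : List (List Bool)),
      pvRound grid q.length (v, q ++ tail) = q.foldl (pvExpand grid) (v, tail) := by
  intro q
  induction q with
  | nil => intro tail v; simp [pvRound]
  | cons c q' ih =>
    intro tail v
    have h1 : pvRound grid (c :: q').length (v, (c :: q') ++ tail) =
        pvRound grid q'.length (pvDirs.foldl (pvStepA grid c.1 c.2) (v, q' ++ tail)) := rfl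
    rw [h1, pv_fold_step_indep grid c.1 c.2 pvDirs v (q' ++ tail), List.append_assoc]
    rw [ih (tail ++ (pvDirs.foldl (pvStepA grid c.1 c.2) (v, [])).2)
        (pvDirs.foldl (pvStepA grid c.1 c.2) (v, [])).1]
    rw [List.foldl_cons]
    congr 1
    show _ = pvExpand grid (v, tail) c
    rw [pvExpand, pv_fold_step_indep grid c.1 c.2 pvDirs v tail]

-- the joint visited/queue invariant at BFS level k
def pvInvV (grid : List (List Int)) (k : Int) (v : List (List Bool))
    (acc : List (Int × Int)) : Prop :=
  pvShape grid v ∧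
  (∀ p, pvRect grid p → (pvVGet v p.1 p.2 = true ↔ (pvD grid p ≤ k ∨ p ∈ acc))) ∧
  (∀ p ∈ acc, pvRect grid p ∧ pvD grid p = k + 1)

theorem pv_expand_inv (grid : List (List Int)) (k : Int) (hne : pvZeros grid ≠ [])
    (c : Int × Int) (hcr : pvRect grid c) (hcd : pvD grid c = k) :
    ∀ (ds : List (Int × Int)), (∀ d ∈ ds, d.1.natAbs + d.2.natAbs = 1) →
    ∀ (v : List (List Bool)) (acc : List (Int × Int)), pvInvV grid k v acc →
      pvInvV grid k (ds.foldl (pvStepA grid c.1 c.2) (v, acc)).1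
        (ds.foldl (pvStepA grid c.1 c.2) (v, acc)).2 ∧
      (∀ x ∈ acc, x ∈ (ds.foldl (pvStepA grid c.1 c.2) (v, acc)).2) ∧
      (∀ d ∈ ds, pvRect grid (d.1 + c.1, d.2 + c.2) →
        pvD grid (d.1 + c.1, d.2 + c.2) = k + 1 →
        (d.1 + c.1, d.2 + c.2) ∈ (ds.foldl (pvStepA grid c.1 c.2) (v, acc)).2) := by
  intro ds
  induction ds with
  | nil =>
    intro _ v acc hinv
    exact ⟨hinv, fun x hx => hx, by simp⟩
  | cons d ds ih =>
    intro hds v acc hinv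
    obtain ⟨hs, hvg, hm⟩ := hinv
    have hd1 : d.1.natAbs + d.2.natAbs = 1 := hds d (by simp)
    have hds' : ∀ d' ∈ ds, d'.1.natAbs + d'.2.natAbs = 1 := fun d' h => hds d' (by simp [h])
    have hmanh : pvManh (d.1 + c.1, d.2 + c.2) c = 1 := by
      unfold pvManh; simp only
      have e1 : d.1 + c.1 - c.1 = d.1 := by ring
      have e2 : d.2 + c.2 - c.2 = d.2 := by ring
      rw [e1, e2]; omega
    simp only [List.foldl_cons]
    by_cases hcond : (0 ≤ d.1 + c.1 ∧ d.1 + c.1 < (grid.length : Int) ∧ 0 ≤ d.2 + c.2 ∧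
        d.2 + c.2 < ((grid.headD []).length : Int) ∧
        pvVGet v (d.1 + c.1) (d.2 + c.2) = false)
    · have hstep : pvStepA grid c.1 c.2 (v, acc) d =
          (pvVSet v (d.1 + c.1) (d.2 + c.2), acc ++ [(d.1 + c.1, d.2 + c.2)]) := by
        simp only [pvStepA]
        rw [if_pos hcond]
      have hrn : pvRect grid (d.1 + c.1, d.2 + c.2) := by
        exact ⟨hcond.1, hcond.2.1, hcond.2.2.1, hcond.2.2.2.1⟩
      have hDgt : ¬(pvD grid (d.1 + c.1, d.2 + c.2) ≤ k ∨ (d.1 + c.1, d.2 + c.2) ∈ acc) := by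
        intro h
        have := (hvg _ hrn).2 h
        rw [hcond.2.2.2.2] at this
        exact Bool.false_ne_true this
      have hDle : pvD grid (d.1 + c.1, d.2 + c.2) ≤ k + 1 := by
        have := pv_dmin_lip grid hne hcr hmanh
        omega
      have hDeq : pvD grid (d.1 + c.1, d.2 + c.2) = k + 1 := by
        rw [not_or] at hDgt
        obtain ⟨hDgt1, hDgt2⟩ := hDgt
        omega
      have hinv' : pvInvV grid k (pvVSet v (d.1 + c.1) (d.2 + c.2))
          (acc ++ [(d.1 + c.1, d.2 + c.2)]) := by
        refine ⟨pv_shape_set grid v _ _ hs, ?_, ?_⟩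
        · intro p hp
          have := pv_vget_set grid v hs (p := (d.1 + c.1, d.2 + c.2)) (q := p) hrn hp
          simp only at this
          rw [this]
          by_cases hpe : p = (d.1 + c.1, d.2 + c.2)
          · simp [hpe]
          · rw [if_neg hpe, hvg p hp]
            simp [List.mem_append, hpe]
        · intro p hpmem
          rcases List.mem_append.1 hpmem with h | h
          · exact hm p h
          · simp at h
            rw [h]
            exact ⟨hrn, hDeq⟩
      obtain ⟨hinv2, hmono2, hdir2⟩ := ih hds' _ _ hinv'
      rw [hstep]
      refine ⟨hinv2, ?_, ?_⟩
      · intro x hx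
        exact hmono2 x (List.mem_append.2 (Or.inl hx))
      · intro d' hd' hr' hD'
        rcases List.mem_cons.1 hd' with h | h
        · subst h
          exact hmono2 _ (List.mem_append.2 (Or.inr (by simp)))
        · exact hdir2 d' h hr' hD'
    · have hstep : pvStepA grid c.1 c.2 (v, acc) d = (v, acc) := by
        simp only [pvStepA]
        rw [if_neg hcond]
      obtain ⟨hinv2, hmono2, hdir2⟩ := ih hds' v acc ⟨hs, hvg, hm⟩
      rw [hstep]
      refine ⟨hinv2, hmono2, ?_⟩
      intro d' hd' hr' hD'
      rcases List.mem_cons.1 hd' with h | h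
      · subst h
        -- the bounds hold (hr'), so the visited test must have been true
        obtain ⟨b1, b2, b3, b4⟩ := id hr'
        have hvt : pvVGet v (d'.1 + c.1) (d'.2 + c.2) = true := by
          by_cases hb : pvVGet v (d'.1 + c.1) (d'.2 + c.2) = false
          · exact absurd ⟨b1, b2, b3, b4, hb⟩ hcond
          · exact Bool.not_eq_false _ |>.mp hb
        have := (hvg _ hr').1 hvt
        rcases this with h | h
        · omega
        · exact hmono2 _ h
      · exact hdir2 d' h hr' hD'

theorem pv_manh_one_dir (p c : Int × Int) (h : pvManh p c = 1) :
    ∃ d ∈ pvDirs, p = (d.1 + c.1, d.2 + c.2) := by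
  obtain ⟨px, py⟩ := p; obtain ⟨cx, cy⟩ := c
  unfold pvManh at h; simp only at h
  have h4 : (px = cx + 1 ∧ py = cy) ∨ (px = cx - 1 ∧ py = cy) ∨
      (px = cx ∧ py = cy + 1) ∨ (px = cx ∧ py = cy - 1) := by omega
  rcases h4 with ⟨h1, h2⟩ | ⟨h1, h2⟩ | ⟨h1, h2⟩ | ⟨h1, h2⟩
  · refine ⟨(1, 0), by simp [pvDirs], ?_⟩
    simp only [Prod.mk.injEq]; constructor <;> omega
  · refine ⟨(-1, 0), by simp [pvDirs], ?_⟩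
    simp only [Prod.mk.injEq]; constructor <;> omega
  · refine ⟨(0, 1), by simp [pvDirs], ?_⟩
    simp only [Prod.mk.injEq]; constructor <;> omega
  · refine ⟨(0, -1), by simp [pvDirs], ?_⟩
    simp only [Prod.mk.injEq]; constructor <;> omega

theorem pv_round_inv (grid : List (List Int)) (k : Int) (_hk : 0 ≤ k)
    (hne : pvZeros grid ≠ []) :
    ∀ (q : List (Int × Int)) (v : List (List Bool)) (acc : List (Int × Int)),
      (∀ p ∈ q, pvRect grid p ∧ pvD grid p = k) →
      pvInvV grid k v acc →
      (∀ p, pvRect grid p → pvD grid p = k + 1 → (p ∈ acc ∨ ∃ c ∈ q, pvManh p c = 1)) →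
      pvInvV grid k (q.foldl (pvExpand grid) (v, acc)).1 (q.foldl (pvExpand grid) (v, acc)).2 ∧
      (∀ p, pvRect grid p → pvD grid p = k + 1 → p ∈ (q.foldl (pvExpand grid) (v, acc)).2) := by
  intro q
  induction q with
  | nil =>
    intro v acc hq hinv hcov
    refine ⟨hinv, ?_⟩
    intro p hp hD
    rcases hcov p hp hD with h | ⟨c, hc, _⟩
    · exact h
    · simp at hc
  | cons c q' ih =>
    intro v acc hq hinv hcov
    have hc := hq c (by simp)
    have hds : ∀ d ∈ pvDirs, d.1.natAbs + d.2.natAbs = 1 := by decide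
    obtain ⟨hinv1, hmono1, hdir1⟩ :=
      pv_expand_inv grid k hne c hc.1 hc.2 pvDirs hds v acc hinv
    have hq' : ∀ p ∈ q', pvRect grid p ∧ pvD grid p = k := fun p h => hq p (by simp [h])
    have hcov' : ∀ p, pvRect grid p → pvD grid p = k + 1 →
        (p ∈ (pvDirs.foldl (pvStepA grid c.1 c.2) (v, acc)).2 ∨ ∃ c' ∈ q', pvManh p c' = 1) := by
      intro p hp hD
      rcases hcov p hp hD with h | ⟨c', hc', hmc⟩
      · exact Or.inl (hmono1 p h)
      · rcases List.mem_cons.1 hc' with h | h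
        · subst h
          obtain ⟨d, hd, rfl⟩ := pv_manh_one_dir p c' hmc
          exact Or.inl (hdir1 d hd hp hD)
        · exact Or.inr ⟨c', h, hmc⟩
    have := ih (pvDirs.foldl (pvStepA grid c.1 c.2) (v, acc)).1
      (pvDirs.foldl (pvStepA grid c.1 c.2) (v, acc)).2 hq' hinv1 hcov'
    rw [Prod.mk.eta] at this
    simpa [List.foldl_cons, pvExpand] using this

-- the BFS while-loop computes the maximum distance
theorem pv_loop_inv (grid : List (List Int)) (hne : pvZeros grid ≠ []) :
    ∀ (fuel : Nat) (k : Int) (v : List (List Bool)) (q : List (Int × Int)),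
      0 ≤ k → k ≤ pvDmax grid + 1 → (pvDmax grid + 1 - k).toNat ≤ fuel →
      pvShape grid v →
      (∀ p, pvRect grid p → (pvVGet v p.1 p.2 = true ↔ pvD grid p ≤ k)) →
      (∀ p ∈ q, pvRect grid p ∧ pvD grid p = k) →
      (∀ p, pvRect grid p → pvD grid p = k → p ∈ q) →
      pvLoopA grid fuel v q k = pvDmax grid := by
  intro fuel
  induction fuel with
  | zero =>
    intro k v q hk0 hk1 hfuel hs hvg hqm hqc
    cases q with
    | nil =>
      have hk : k = pvDmax grid + 1 := by
        by_contra hne'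
        have hk2 : k ≤ pvDmax grid := by omega
        obtain ⟨p, hp, hD⟩ := pv_frontier_nonempty grid hne k hk0 hk2
        simpa using hqc p hp hD
      show k - 1 = pvDmax grid
      omega
    | cons c q' =>
      exfalso
      have hc := hqm c (by simp)
      have := pv_dmin_le_Dmax grid hc.1
      omega
  | succ f ih =>
    intro k v q hk0 hk1 hfuel hs hvg hqm hqc
    cases q with
    | nil =>
      have hk : k = pvDmax grid + 1 := by
        by_contra hne'
        have hk2 : k ≤ pvDmax grid := by omega
        obtain ⟨p, hp, hD⟩ := pv_frontier_nonempty grid hne k hk0 hk2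
        simpa using hqc p hp hD
      show k - 1 = pvDmax grid
      omega
    | cons c q' =>
      have hkD : k ≤ pvDmax grid := by
        have hc := hqm c (by simp)
        have := pv_dmin_le_Dmax grid hc.1
        omega
      have hstep : pvLoopA grid (f + 1) v (c :: q') k =
          pvLoopA grid f (pvRound grid (c :: q').length (v, c :: q')).1
            (pvRound grid (c :: q').length (v, c :: q')).2 (k + 1) := rfl
      have hround : pvRound grid (c :: q').length (v, c :: q') =
          (c :: q').foldl (pvExpand grid) (v, []) := by
        have := pv_round_eq grid (c :: q') [] v
        simpa using this
      have hinv0 : pvInvV grid k v [] := by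
        refine ⟨hs, ?_, by simp⟩
        intro p hp
        rw [hvg p hp]; simp
      have hcov0 : ∀ p, pvRect grid p → pvD grid p = k + 1 →
          (p ∈ ([] : List (Int × Int)) ∨ ∃ c' ∈ c :: q', pvManh p c' = 1) := by
        intro p hp hD
        have hpos : 0 < pvD grid p := by omega
        obtain ⟨p', hp', hm, hD'⟩ := pv_dmin_descend grid hne hp hpos
        exact Or.inr ⟨p', hqc p' hp' (by omega), hm⟩
      obtain ⟨⟨hs', hvg', hm'⟩, hcomp⟩ :=
        pv_round_inv grid k hk0 hne (c :: q') v [] hqm hinv0 hcov0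
      rw [hstep, hround]
      apply ih (k + 1) _ _ (by omega) (by omega) (by omega) hs'
      · intro p hp
        rw [hvg' p hp]
        constructor
        · rintro (h | h)
          · omega
          · have := (hm' p h).2; omega
        · intro h
          by_cases he : pvD grid p = k + 1
          · exact Or.inr (hcomp p hp he)
          · exact Or.inl (by omega)
      · intro p hp
        exact hm' p hp
      · intro p hp hD
        exact hcomp p hp hD

-- the initial zero-scan
def pvScanStep (grid : List (List Int)) (st : List (List Bool) × List (Int × Int))
    (p : Int × Int) : List (List Bool) × List (Int × Int) :=
  if pvGridAt grid p.1 p.2 = 0 then (pvVSet st.1 p.1 p.2, st.2 ++ [p]) else st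

theorem pv_scan_inv (grid : List (List Int)) :
    ∀ (cs : List (Int × Int)) (v : List (List Bool)) (q : List (Int × Int)),
      (∀ c ∈ cs, pvRect grid c) → pvShape grid v →
      (∀ p, pvRect grid p → (pvVGet v p.1 p.2 = true ↔ p ∈ q)) →
      (∀ p ∈ q, pvRect grid p ∧ pvGridAt grid p.1 p.2 = 0) →
      pvShape grid (cs.foldl (pvScanStep grid) (v, q)).1 ∧
      (∀ p, pvRect grid p →
        (pvVGet (cs.foldl (pvScanStep grid) (v, q)).1 p.1 p.2 = true ↔
          p ∈ (cs.foldl (pvScanStep grid) (v, q)).2)) ∧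
      (∀ p ∈ (cs.foldl (pvScanStep grid) (v, q)).2,
        pvRect grid p ∧ pvGridAt grid p.1 p.2 = 0) ∧
      (∀ x ∈ q, x ∈ (cs.foldl (pvScanStep grid) (v, q)).2) ∧
      (∀ c ∈ cs, pvGridAt grid c.1 c.2 = 0 → c ∈ (cs.foldl (pvScanStep grid) (v, q)).2) := by
  intro cs
  induction cs with
  | nil =>
    intro v q _ hs hvg hqm
    exact ⟨hs, hvg, hqm, fun x hx => hx, by simp⟩
  | cons c cs ih =>
    intro v q hcs hs hvg hqm
    have hcr : pvRect grid c := hcs c (by simp)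
    have hcs' : ∀ c' ∈ cs, pvRect grid c' := fun c' h => hcs c' (by simp [h])
    simp only [List.foldl_cons]
    by_cases hg : pvGridAt grid c.1 c.2 = 0
    · have hstep : pvScanStep grid (v, q) c = (pvVSet v c.1 c.2, q ++ [c]) := by
        simp [pvScanStep, hg]
      rw [hstep]
      have hvg' : ∀ p, pvRect grid p →
          (pvVGet (pvVSet v c.1 c.2) p.1 p.2 = true ↔ p ∈ q ++ [c]) := by
        intro p hp
        have := pv_vget_set grid v hs (p := c) (q := p) hcr hp
        rw [this]
        by_cases hpe : p = c
        · simp [hpe]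
        · rw [if_neg hpe, hvg p hp]
          simp [List.mem_append, hpe]
      have hqm' : ∀ p ∈ q ++ [c], pvRect grid p ∧ pvGridAt grid p.1 p.2 = 0 := by
        intro p hpmem
        rcases List.mem_append.1 hpmem with h | h
        · exact hqm p h
        · simp at h; rw [h]; exact ⟨hcr, hg⟩
      obtain ⟨a1, a2, a3, a4, a5⟩ := ih (pvVSet v c.1 c.2) (q ++ [c]) hcs'
        (pv_shape_set grid v _ _ hs) hvg' hqm'
      refine ⟨a1, a2, a3, ?_, ?_⟩
      · intro x hx
        exact a4 x (List.mem_append.2 (Or.inl hx))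
      · intro c' hc' hg'
        rcases List.mem_cons.1 hc' with h | h
        · subst h
          exact a4 _ (List.mem_append.2 (Or.inr (by simp)))
        · exact a5 c' h hg'
    · have hstep : pvScanStep grid (v, q) c = (v, q) := by
        simp [pvScanStep, hg]
      rw [hstep]
      obtain ⟨a1, a2, a3, a4, a5⟩ := ih v q hcs' hs hvg hqm
      refine ⟨a1, a2, a3, a4, ?_⟩
      intro c' hc' hg'
      rcases List.mem_cons.1 hc' with h | h
      · subst h; exact absurd hg' hg
      · exact a5 c' h hg'

-- the initial all-false visited matrix
theorem pv_v0_shape (grid : List (List Int)) :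
    pvShape grid ((List.range grid.length).map
      (fun _ => (List.range (grid.headD []).length).map (fun _ => false))) := by
  constructor
  · simp
  · intro row hrow
    simp only [List.mem_map] at hrow
    obtain ⟨_, _, h⟩ := hrow
    simp [← h]

theorem pv_getD_false (L : List Bool) (hL : ∀ b ∈ L, b = false) (m : Nat) :
    L.getD m false = false := by
  rw [List.getD_eq_getElem?_getD]
  cases hx : L[m]? with
  | none => rfl
  | some b => exact hL b (List.mem_of_getElem? hx)

theorem pv_v0_false (grid : List (List Int)) (i j : Int) :
    pvVGet ((List.range grid.length).map
      (fun _ => (List.range (grid.headD []).length).map (fun _ => false))) i j = false := by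
  unfold pvVGet
  apply pv_getD_false
  intro b hb
  rw [List.getD_eq_getElem?_getD] at hb
  cases hx : ((List.range grid.length).map
      (fun _ => (List.range (grid.headD []).length).map (fun _ => false)))[i.toNat]? with
  | none => rw [hx] at hb; simp at hb
  | some row =>
    rw [hx] at hb
    have hrow := List.mem_of_getElem? hx
    simp only [List.mem_map] at hrow
    obtain ⟨_, _, h⟩ := hrow
    rw [← h] at hb
    simp only [Option.getD_some, List.mem_map] at hb
    obtain ⟨_, _, hb⟩ := hb
    exact hb.symm

-- characterizations of the two ports
theorem pv_A_characterization (grid : List (List Int)) :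
    findDistance grid = if pvZeros grid = [] then -1 else pvDmax grid := by
  have hfold : (PySem.List.pyRange 0 (grid.length : Int) 1).foldl
      (fun (st : List (List Bool) × List (Int × Int)) (i : Int) =>
        (PySem.List.pyRange 0 ((grid.headD []).length : Int) 1).foldl
          (fun (st : List (List Bool) × List (Int × Int)) (j : Int) =>
            if pvGridAt grid i j = 0 then (pvVSet st.1 i j, st.2 ++ [(i, j)]) else st) st)
      ((List.range grid.length).map
        (fun _ => (List.range (grid.headD []).length).map (fun _ => false)),
        ([] : List (Int × Int)))
      = (pvCells grid).foldl (pvScanStep grid)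
        ((List.range grid.length).map
          (fun _ => (List.range (grid.headD []).length).map (fun _ => false)), []) := by
    unfold pvCells pvR pvC
    rw [pv_foldl_flatMap]
    apply PySem.List.foldl_congr_mem
    intro acc i _
    rw [List.foldl_map]
    rfl
  show pvLoopA grid (grid.length * (grid.headD []).length + 1)
      ((PySem.List.pyRange 0 (grid.length : Int) 1).foldl
        (fun (st : List (List Bool) × List (Int × Int)) (i : Int) =>
          (PySem.List.pyRange 0 ((grid.headD []).length : Int) 1).foldl
            (fun (st : List (List Bool) × List (Int × Int)) (j : Int) =>
              if pvGridAt grid i j = 0 then (pvVSet st.1 i j, st.2 ++ [(i, j)]) else st) st)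
        ((List.range grid.length).map
          (fun _ => (List.range (grid.headD []).length).map (fun _ => false)),
          ([] : List (Int × Int)))).1
      ((PySem.List.pyRange 0 (grid.length : Int) 1).foldl
        (fun (st : List (List Bool) × List (Int × Int)) (i : Int) =>
          (PySem.List.pyRange 0 ((grid.headD []).length : Int) 1).foldl
            (fun (st : List (List Bool) × List (Int × Int)) (j : Int) =>
              if pvGridAt grid i j = 0 then (pvVSet st.1 i j, st.2 ++ [(i, j)]) else st) st)
        ((List.range grid.length).map
          (fun _ => (List.range (grid.headD []).length).map (fun _ => false)),
          ([] : List (Int × Int)))).2 0 = _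
  rw [hfold]
  obtain ⟨s1, s2, s3, s4, s5⟩ := pv_scan_inv grid (pvCells grid)
    ((List.range grid.length).map
      (fun _ => (List.range (grid.headD []).length).map (fun _ => false))) []
    (fun c hc => (pv_mem_cells grid c).1 hc) (pv_v0_shape grid)
    (by intro p _; rw [pv_v0_false grid p.1 p.2]; simp)
    (by simp)
  have hqz : ∀ p, p ∈ ((pvCells grid).foldl (pvScanStep grid)
      ((List.range grid.length).map
        (fun _ => (List.range (grid.headD []).length).map (fun _ => false)),
        [])).2 ↔ p ∈ pvZeros grid := by
    intro p
    constructor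
    · intro h
      exact (pv_mem_zeros grid p).2 (s3 p h)
    · intro h
      have hm := (pv_mem_zeros grid p).1 h
      exact s5 p ((pv_mem_cells grid p).2 hm.1) hm.2
  by_cases hz : pvZeros grid = []
  · have hqnil : ((pvCells grid).foldl (pvScanStep grid)
        ((List.range grid.length).map
          (fun _ => (List.range (grid.headD []).length).map (fun _ => false)),
          [])).2 = [] := by
      cases hst : ((pvCells grid).foldl (pvScanStep grid)
          ((List.range grid.length).map
            (fun _ => (List.range (grid.headD []).length).map (fun _ => false)),
            [])).2 with
      | nil => rfl
      | cons a t =>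
        have := (hqz a).1 (by rw [hst]; simp)
        rw [hz] at this
        simp at this
    rw [hqnil, if_pos hz]
    show (0 : Int) - 1 = -1
    norm_num
  · rw [if_neg hz]
    obtain ⟨z0, hz0⟩ := List.exists_mem_of_ne_nil _ hz
    have hz0r := pv_rect_of_mem_zeros grid hz0
    have hR1 : 1 ≤ pvR grid := by
      obtain ⟨a, b, c, d⟩ := hz0r; omega
    have hC1 : 1 ≤ pvC grid := by
      obtain ⟨a, b, c, d⟩ := hz0r; omega
    have hDb : pvDmax grid ≤ pvR grid + pvC grid - 2 := by
      apply pv_foldl_max_le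
      · omega
      · intro p hp
        have hpr := (pv_mem_cells grid p).1 hp
        have h1 := pv_dmin_le_manh grid p hz0
        have h2 : pvManh p z0 ≤ pvR grid + pvC grid - 2 := by
          obtain ⟨a1, a2, a3, a4⟩ := hpr
          obtain ⟨b1, b2, b3, b4⟩ := hz0r
          unfold pvManh
          omega
        omega
    have hRC : pvR grid + pvC grid - 2 ≤ pvR grid * pvC grid := by nlinarith
    have hcast : pvR grid * pvC grid = ((grid.length * (grid.headD []).length : Nat) : Int) := by
      unfold pvR pvC
      push_cast
      ring
    apply pv_loop_inv grid hz (grid.length * (grid.headD []).length + 1) 0 _ _ le_rfl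
      (by have := pv_Dmax_nonneg grid; omega) (by omega) s1
    · intro p hp
      rw [s2 p hp, hqz p]
      constructor
      · intro h
        have := (pv_dmin_zero_iff grid hz hp).2 h
        omega
      · intro h
        have h0 := pv_dmin_nonneg grid p
        exact (pv_dmin_zero_iff grid hz hp).1 (by omega)
    · intro p h
      have hm := (pv_mem_zeros grid p).1 ((hqz p).1 h)
      exact ⟨hm.1, (pv_dmin_zero_iff grid hz hm.1).2 ((pv_mem_zeros grid p).2 hm)⟩
    · intro p hp hD
      exact (hqz p).2 ((pv_dmin_zero_iff grid hz hp).1 hD)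

theorem pv_B_characterization (grid : List (List Int)) :
    findDistance_alt grid = if pvZeros grid = [] then -1 else pvDmax grid := by
  by_cases hg : grid = []
  · subst hg
    have h1 : pvZeros ([] : List (List Int)) = [] := rfl
    rw [h1]
    rfl
  rw [findDistance_alt, if_neg hg]
  show (if pvZeros grid = [] then (-1 : Int)
      else (PySem.List.pyRange 0 (pvR grid) 1).foldl (fun (best i : Int) =>
        (PySem.List.pyRange 0 (pvC grid) 1).foldl (fun (best j : Int) =>
          if ((pvZeros grid).foldl
              (fun (d : Int) (z : Int × Int) => min d (|i - z.1| + |j - z.2|))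
              (pvR grid + pvC grid)) > best
          then ((pvZeros grid).foldl
              (fun (d : Int) (z : Int × Int) => min d (|i - z.1| + |j - z.2|))
              (pvR grid + pvC grid))
          else best) best) 0) = _
  by_cases hz : pvZeros grid = []
  · simp [hz]
  · rw [if_neg hz, if_neg hz]
    unfold pvDmax pvCells
    rw [pv_foldl_flatMap]
    apply PySem.List.foldl_congr_mem
    intro acc i _
    rw [List.foldl_map]
    apply PySem.List.foldl_congr_mem
    intro acc2 j _
    show (if ((pvZeros grid).foldl
          (fun (d : Int) (z : Int × Int) => min d (|i - z.1| + |j - z.2|))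
          (pvR grid + pvC grid)) > acc2
        then ((pvZeros grid).foldl
          (fun (d : Int) (z : Int × Int) => min d (|i - z.1| + |j - z.2|))
          (pvR grid + pvC grid))
        else acc2) = max acc2 (pvD grid (i, j))
    have hd : (pvZeros grid).foldl
        (fun (d : Int) (z : Int × Int) => min d (|i - z.1| + |j - z.2|))
        (pvR grid + pvC grid) = pvD grid (i, j) := by
      unfold pvD
      apply PySem.List.foldl_congr_mem
      intro a z _
      rw [Int.abs_eq_natAbs, Int.abs_eq_natAbs]
      rfl
    simp only [hd]
    rw [max_def]
    split_ifs <;> omega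

-- ===== VERDICT (by name: the statement is the Claim_ definition above) =====
theorem findDistance_spec : Claim_equal_findDistance := by
  intro grid _ _
  show findDistance grid = findDistance_alt grid
  rw [pv_A_characterization, pv_B_characterization]
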